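-- pv_equiv track=rewrite | github.com/ceph/ceph | teuthology/task/pcp.py | _sanitize_metric_name
-- ===== SOURCE A (Python) =====
-- def _sanitize_metric_name(metric):
--     result = metric
--     replacements = [
--         (' ', '_'),
--         ('*', '_all_'),
--     ]
--     for rep in replacements:
--         result = result.replace(rep[0], rep[1])
--     return result
-- ===== SOURCE B (Python) =====
-- def _sanitize_metric_name(metric):
--     table = {' ': '_', '*': '_all_'}
--     return ''.join(table.get(c, c) for c in metric)
-- ===== Notes on version B (the rewrite author's own statement) =====
-- stated objective: alternative
-- what changed: Replaces the two sequential full-string .replace passes with a dict replacement table driving a single character-by-character pass joined into the result string.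
import Mathlib
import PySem

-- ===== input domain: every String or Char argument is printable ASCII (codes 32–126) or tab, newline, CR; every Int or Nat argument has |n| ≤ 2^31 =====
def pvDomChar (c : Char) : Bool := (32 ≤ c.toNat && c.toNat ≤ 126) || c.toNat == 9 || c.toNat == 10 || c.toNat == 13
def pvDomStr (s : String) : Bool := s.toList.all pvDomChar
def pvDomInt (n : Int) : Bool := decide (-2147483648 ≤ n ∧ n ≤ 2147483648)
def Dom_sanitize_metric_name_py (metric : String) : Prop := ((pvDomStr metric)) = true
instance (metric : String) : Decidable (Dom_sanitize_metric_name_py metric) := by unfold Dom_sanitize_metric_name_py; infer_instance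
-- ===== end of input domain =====

-- B replaces A's two sequential full-string .replace passes with a dict replacement
-- table driving a single character-by-character pass ('alternative' objective).

-- ===== PORT A =====
-- result = metric; for (old, new) in [(' ','_'), ('*','_all_')]: result = result.replace(old, new)
def sanitize_metric_name_py (metric : String) : String :=
  [(" ", "_"), ("*", "_all_")].foldl (fun result rep => PySem.Str.replace result rep.1 rep.2) metric

-- ===== PORT B =====
-- table = {' ': '_', '*': '_all_'}
def pvTable : PySem.Dict Char String :=
  (PySem.Dict.empty.insert ' ' "_").insert '*' "_all_"
-- ''.join(table.get(c, c) for c in metric)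
def sanitize_metric_name_py_alt (metric : String) : String :=
  PySem.Str.join "" (metric.toList.map (fun c => pvTable.getD c (String.ofList [c])))

-- ===== PRECONDITION & SPEC =====
def Spec_sanitize_metric_name_py (metric : String) (out : String) : Prop := out = sanitize_metric_name_py_alt metric
instance (metric : String) (out : String) : Decidable (Spec_sanitize_metric_name_py metric out) := by unfold Spec_sanitize_metric_name_py; infer_instance

-- ===== CLAIM (what is proved, stated in full; the proofs are below) =====
def Claim_equal_sanitize_metric_name_py : Prop := ∀ (metric : String), Dom_sanitize_metric_name_py metric → Spec_sanitize_metric_name_py metric (sanitize_metric_name_py metric)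

-- ===== LEMMAS AND PROOFS =====

-- Chars.replace with a single-character pattern is a per-character flatMap.
theorem replace_go_single (a : Char) (new : List Char) :
    ∀ (fuel : Nat) (l acc : List Char), l.length ≤ fuel →
      PySem.Chars.replace.go [a] new fuel l acc =
        acc.reverse ++ l.flatMap (fun c => if c = a then new else [c]) := by
  intro fuel
  induction fuel with
  | zero =>
    intro l acc h
    have : l = [] := List.eq_nil_of_length_eq_zero (Nat.le_zero.mp h)
    subst this
    simp [PySem.Chars.replace.go]
  | succ n ih =>
    intro l acc h
    cases l with
    | nil => simp [PySem.Chars.replace.go]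
    | cons c t =>
      simp only [PySem.Chars.replace.go]
      by_cases hc : c = a
      · subst hc
        have hp : List.isPrefixOf [c] (c :: t) = true := by
          simp [List.isPrefixOf]
        simp only [hp, if_pos]
        rw [ih]
        · simp
        · simpa using Nat.le_of_succ_le_succ h
      · have hp : List.isPrefixOf [a] (c :: t) = false := by
          simp [List.isPrefixOf]
          intro hac; exact absurd hac.symm hc
        simp only [hp]
        rw [if_neg (by simp [hp]), ih t (c :: acc) (Nat.le_of_succ_le_succ h)]
        simp [hc]

theorem replace_single (a : Char) (new : List Char) (l : List Char) :
    PySem.Chars.replace l [a] new = l.flatMap (fun c => if c = a then new else [c]) := by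
  simpa using replace_go_single a new l.length l [] (le_refl _)

-- the two sequential single-char replaces equal the table-driven one-pass flatten
theorem passes_eq (cs : List Char) :
    PySem.Chars.replace (PySem.Chars.replace cs [' '] ['_']) ['*'] "_all_".toList
      = (cs.map (fun c => (pvTable.getD c (String.ofList [c])).toList)).flatten := by
  rw [replace_single, replace_single]
  induction cs with
  | nil => simp
  | cons c t ih =>
    simp only [List.flatMap_cons, List.flatMap_append, List.map_cons, List.flatten_cons, ih]
    congr 1
    by_cases h1 : c = ' '
    · subst h1; decide
    · by_cases h2 : c = '*'
      · subst h2; decide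
      · simp only [if_neg h1, List.flatMap_cons, List.flatMap_nil, if_neg h2, List.append_nil]
        have e1 : (' ' == c) = false := by simp; exact fun h => h1 h.symm
        have e2 : ('*' == c) = false := by simp; exact fun h => h2 h.symm
        have : pvTable.getD c (String.ofList [c]) = String.ofList [c] := by
          simp [pvTable, PySem.Dict.getD, PySem.Dict.empty, PySem.Dict.insert,
            PySem.Dict.get?, List.find?, e1, e2]
        simp [this]

-- ===== VERDICT (by name: the statement is the Claim_ definition above) =====
theorem sanitize_metric_name_py_spec : Claim_equal_sanitize_metric_name_py := by
  unfold Claim_equal_sanitize_metric_name_py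
  intro metric _
  unfold Spec_sanitize_metric_name_py sanitize_metric_name_py sanitize_metric_name_py_alt
  apply String.toList_inj.mp
  simp only [List.foldl_cons, List.foldl_nil, PySem.Str.toList_replace, PySem.Str.toList_join,
    List.map_map]
  have h2 : ∀ (L : List (List Char)), List.intercalate [] L = L.flatten := by
    intro L
    induction L with
    | nil => simp [List.intercalate]
    | cons x t ih =>
      cases t <;> simp_all [List.intercalate, List.intersperse]
  simpa [PySem.Chars.join, Function.comp, h2] using passes_eq metric.toList
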